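-- pv_equiv track=rewrite | github.com/TasneemShaffee/StratoFlow | workspace/final-project/example_designs/scheduler_handler.py | interleave_decoders_zigzag
-- ===== SOURCE A (Python) =====
-- def interleave_decoders_zigzag(encoder, dec_sorted):
--     seq = encoder.copy()
--     task_ids = sorted(dec_sorted.keys())
--     max_len  = max(len(dec_sorted[t]) for t in task_ids)
--     for i in range(max_len):
--         if i % 2 == 0:
--             order = task_ids
--         else:
--             order = list(reversed(task_ids))
--
--         for tid in order:
--             layers = dec_sorted[tid]
--             if i < len(layers):
--                 seq.append(layers[i])
--
--     return seq
-- ===== SOURCE B (Python) =====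
-- def interleave_decoders_zigzag(encoder, dec_sorted):
--     task_ids = sorted(dec_sorted.keys())
--     max_len = max(len(dec_sorted[t]) for t in task_ids)
--     rows = [[] for _ in range(max_len)]
--     for t in task_ids:
--         for i, v in enumerate(dec_sorted[t]):
--             rows[i].append(v)
--     seq = encoder.copy()
--     for i, row in enumerate(rows):
--         seq.extend(row if i % 2 == 0 else reversed(row))
--     return seq
-- ===== Notes on version B (the rewrite author's own statement) =====
-- stated objective: alternative
-- what changed: B transposes the traversal: instead of A's level-major scan (for each level, walk the task list forward or backward with an in-range check per task), B makes a single pass over each task's layer list, dealing every layer into its per-level bucket, then flattens the buckets onto a copy of the encoder, reversing the odd-level buckets as it goes.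
import Mathlib
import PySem

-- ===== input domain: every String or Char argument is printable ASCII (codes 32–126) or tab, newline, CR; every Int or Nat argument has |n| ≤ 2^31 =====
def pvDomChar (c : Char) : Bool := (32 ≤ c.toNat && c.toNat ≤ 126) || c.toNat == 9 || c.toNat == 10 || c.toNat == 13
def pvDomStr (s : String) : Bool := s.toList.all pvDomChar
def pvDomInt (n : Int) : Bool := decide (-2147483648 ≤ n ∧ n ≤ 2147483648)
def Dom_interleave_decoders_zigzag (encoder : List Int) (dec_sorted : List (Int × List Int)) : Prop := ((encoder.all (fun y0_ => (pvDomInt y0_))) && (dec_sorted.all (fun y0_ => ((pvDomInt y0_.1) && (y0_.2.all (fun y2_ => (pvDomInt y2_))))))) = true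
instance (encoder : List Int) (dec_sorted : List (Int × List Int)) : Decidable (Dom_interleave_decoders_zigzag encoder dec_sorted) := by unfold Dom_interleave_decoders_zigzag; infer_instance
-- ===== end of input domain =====

-- B replaces A's level-major zigzag scan by a task-major single pass that deals each layer into
-- its per-level bucket and then flattens the buckets, reversing the odd-level ones
-- (objective: alternative decomposition / transposed traversal; neither mutates its arguments).


-- ===== PORT A =====
def interleave_decoders_zigzag (encoder : List Int) (dec_sorted₀ : List (Int × List Int)) : List Int :=
  let dec_sorted := PySem.Dict.ofList dec_sorted₀
  let task_ids := PySem.List.sorted (PySem.Dict.keys dec_sorted) (fun x => x) false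
  match PySem.List.max? (task_ids.map (fun t => ((PySem.Dict.getD dec_sorted t []).length : Int))) (fun x => x) with
  | none => []  -- max() on an empty sequence: ValueError (excluded by Pre_)
  | some max_len =>
    (PySem.List.pyRange 0 max_len 1).foldl (fun seq i =>
      let order := if PySem.Int.mod i 2 == 0 then task_ids else task_ids.reverse
      order.foldl (fun seq tid =>
        let layers := PySem.Dict.getD dec_sorted tid []
        if i < (layers.length : Int) then seq ++ [PySem.List.pyGetD layers i 0] else seq) seq) encoder

-- ===== PORT B =====
def interleave_decoders_zigzag_alt (encoder : List Int) (dec_sorted₀ : List (Int × List Int)) : List Int :=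
  let dec_sorted := PySem.Dict.ofList dec_sorted₀
  let task_ids := PySem.List.sorted (PySem.Dict.keys dec_sorted) (fun x => x) false
  match PySem.List.max? (task_ids.map (fun t => ((PySem.Dict.getD dec_sorted t []).length : Int))) (fun x => x) with
  | none => []  -- max() on an empty sequence: ValueError (excluded by Pre_)
  | some max_len =>
    -- rows = [[] for _ in range(max_len)]
    let rows0 := (PySem.List.pyRange 0 max_len 1).map (fun _ => ([] : List Int))
    -- deal each task's layers into the buckets; rows[i] is in range since i < len(layers) ≤ max_len,
    -- so List.modify (a no-op out of range) is exact here
    let rows := task_ids.foldl (fun rows t =>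
      (PySem.List.enumerate (PySem.Dict.getD dec_sorted t []) 0).foldl (fun rows iv =>
        rows.modify iv.1.toNat (fun r => r ++ [iv.2])) rows) rows0
    -- seq.extend(row if i % 2 == 0 else reversed(row)); reversed(row) is exactly List.reverse
    (PySem.List.enumerate rows 0).foldl (fun seq ir =>
      seq ++ (if PySem.Int.mod ir.1 2 == 0 then ir.2 else ir.2.reverse)) encoder

-- ===== PRECONDITION & SPEC =====
-- Pre_: dec_sorted must be nonempty — on an empty dict both Pythons raise ValueError (max() of an empty sequence).
def Pre_interleave_decoders_zigzag (_encoder : List Int) (dec_sorted : List (Int × List Int)) : Prop := dec_sorted ≠ []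
instance (encoder : List Int) (dec_sorted : List (Int × List Int)) : Decidable (Pre_interleave_decoders_zigzag encoder dec_sorted) := by unfold Pre_interleave_decoders_zigzag; infer_instance
def pvWitness_interleave_decoders_zigzag : List Int × (List (Int × List Int)) := ([1, 2], [(1, [10, 11]), (0, [20])])

def Spec_interleave_decoders_zigzag (encoder : List Int) (dec_sorted : List (Int × List Int)) (out : List Int) : Prop := out = interleave_decoders_zigzag_alt encoder dec_sorted
instance (encoder : List Int) (dec_sorted : List (Int × List Int)) (out : List Int) : Decidable (Spec_interleave_decoders_zigzag encoder dec_sorted out) := by unfold Spec_interleave_decoders_zigzag; infer_instance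

-- ===== CLAIM (what is proved, stated in full; the proofs are below) =====
def Claim_equal_interleave_decoders_zigzag : Prop := ∀ (encoder : List Int) (dec_sorted : List (Int × List Int)), Dom_interleave_decoders_zigzag encoder dec_sorted → Pre_interleave_decoders_zigzag encoder dec_sorted → Spec_interleave_decoders_zigzag encoder dec_sorted (interleave_decoders_zigzag encoder dec_sorted)

-- ===== LEMMAS AND PROOFS =====

-- the forward (task-ascending) row of level j over the tasks in l, and its zigzag variant
def fwRow (d : PySem.Dict Int (List Int)) (j : Nat) (l : List Int) : List Int :=
  (l.filter (fun t => j < (PySem.Dict.getD d t []).length)).map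
      (fun t => (PySem.Dict.getD d t []).getD j 0)
def zigRow (d : PySem.Dict Int (List Int)) (j : Nat) (l : List Int) : List Int :=
  if j % 2 == 0 then fwRow d j l else (fwRow d j l).reverse

-- A's inner loop over `order` appends exactly the filtered-and-indexed row.
theorem inner_loop_eq (d : PySem.Dict Int (List Int)) (i : Int) (l : List Int) (s : List Int) :
    l.foldl (fun seq tid =>
        let layers := PySem.Dict.getD d tid []
        if i < (layers.length : Int) then seq ++ [PySem.List.pyGetD layers i 0] else seq) s
    = s ++ (l.filter (fun t => i < ((PySem.Dict.getD d t []).length : Int))).map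
          (fun t => PySem.List.pyGetD (PySem.Dict.getD d t []) i 0) := by
  induction l generalizing s with
  | nil => simp
  | cons x xs ih =>
    by_cases h : i < ((PySem.Dict.getD d x []).length : Int) <;>
      simp [h, ih]

theorem mod_two_beq_zero (s : Nat) :
    (PySem.Int.mod (s : Int) 2 == 0) = (s % 2 == 0) := by
  rw [show (2 : Int) = ((2 : Nat) : Int) from rfl, PySem.Int.mod_natCast]
  simp
  omega

-- B's per-task dealing loop, pointwise: bucket j receives exactly layer j of this task.
theorem bucket_inner (vs : List Int) : ∀ (s : Nat) (rows : List (List Int)) (j : Nat),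
    ((PySem.List.enumerate vs (s : Int)).foldl (fun rows iv =>
        rows.modify iv.1.toNat (fun r => r ++ [iv.2])) rows)[j]?
    = if s ≤ j ∧ j < s + vs.length then
        rows[j]?.map (fun r => r ++ [vs.getD (j - s) 0])
      else rows[j]? := by
  induction vs with
  | nil =>
    intro s rows j
    rw [PySem.List.enumerate_nil, List.foldl_nil, if_neg (by simp)]
  | cons v vs ih =>
    intro s rows j
    rw [PySem.List.enumerate_cons, List.foldl_cons]
    simp only [List.length_cons]
    have hs1 : (s : Int) + 1 = ((s + 1 : Nat) : Int) := by push_cast; ring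
    rw [hs1, ih (s + 1)]
    simp only [Int.toNat_natCast, List.getElem?_modify]
    cases hrow : rows[j]? with
    | none => split_ifs <;> simp
    | some r =>
      by_cases hj : s = j
      · subst hj
        rw [if_neg (by omega), if_pos (by omega)]
        simp
      · by_cases h2 : s + 1 ≤ j ∧ j < s + 1 + vs.length
        · rw [if_pos h2, if_pos (by omega)]
          obtain ⟨k, hk⟩ : ∃ k, j - s = k + 1 := ⟨j - s - 1, by omega⟩
          have hk' : j - (s + 1) = k := by omega
          simp [hk, hk', hj]
        · rw [if_neg h2, if_neg (by omega)]
          simp [hj]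

-- bucket_inner at start index 0 (the form B's port uses)
theorem bucket_inner0 (vs : List Int) (rows : List (List Int)) (j : Nat) :
    ((PySem.List.enumerate vs 0).foldl (fun rows iv =>
        rows.modify iv.1.toNat (fun r => r ++ [iv.2])) rows)[j]?
    = if j < vs.length then
        rows[j]?.map (fun r => r ++ [vs.getD j 0])
      else rows[j]? := by
  simpa using bucket_inner vs 0 rows j

-- B's outer dealing loop builds exactly the zigzag rows of the processed tasks.
theorem bucket_loop (d : PySem.Dict Int (List Int)) (M : Nat) (l : List Int)
    (h : ∀ t ∈ l, (PySem.Dict.getD d t []).length ≤ M) (j : Nat) :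
    (l.foldl (fun rows t =>
        (PySem.List.enumerate (PySem.Dict.getD d t []) 0).foldl (fun rows iv =>
          rows.modify iv.1.toNat (fun r => r ++ [iv.2])) rows)
      ((List.range M).map (fun _ => ([] : List Int))))[j]?
    = if j < M then some (fwRow d j l) else none := by
  induction l using List.reverseRecOn with
  | nil =>
    simp only [List.foldl_nil, List.getElem?_map]
    by_cases hj : j < M <;> simp [hj, fwRow]
  | append_singleton l t ih =>
    have hl : ∀ t' ∈ l, (PySem.Dict.getD d t' []).length ≤ M := fun t' ht' => h t' (by simp [ht'])
    have ht : (PySem.Dict.getD d t []).length ≤ M := h t (by simp)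
    rw [List.foldl_append, List.foldl_cons, List.foldl_nil]
    rw [bucket_inner0, ih hl]
    by_cases hin : j < (PySem.Dict.getD d t []).length
    · rw [if_pos (by omega), if_pos (by omega), if_pos (by omega)]
      simp only [Option.map_some, Option.some.injEq]
      unfold fwRow
      rw [List.filter_append, List.map_append]
      simp [hin]
    · rw [if_neg (by omega)]
      by_cases hj : j < M
      · rw [if_pos hj, if_pos hj]
        unfold fwRow
        rw [List.filter_append]
        simp [hin]
      · rw [if_neg hj, if_neg hj]

-- the Int-indexed row A produces at level (j : Nat) is zigRow
theorem row_bridge (d : PySem.Dict Int (List Int)) (l : List Int) (j : Nat) :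
    (if PySem.Int.mod (j : Int) 2 == 0 then
        (l.filter (fun t => (j : Int) < ((PySem.Dict.getD d t []).length : Int))).map
          (fun t => PySem.List.pyGetD (PySem.Dict.getD d t []) (j : Int) 0)
      else
        ((l.filter (fun t => (j : Int) < ((PySem.Dict.getD d t []).length : Int))).map
          (fun t => PySem.List.pyGetD (PySem.Dict.getD d t []) (j : Int) 0)).reverse)
    = zigRow d j l := by
  have hf : (fun t => decide ((j : Int) < ((PySem.Dict.getD d t []).length : Int)))
      = (fun t => decide (j < (PySem.Dict.getD d t []).length)) := by
    funext t; simp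
  have hg : (fun t => PySem.List.pyGetD (PySem.Dict.getD d t []) (j : Int) 0)
      = (fun t => (PySem.Dict.getD d t []).getD j 0) := by
    funext t; exact PySem.List.pyGetD_natCast _ j 0
  unfold zigRow fwRow
  rw [mod_two_beq_zero]
  simp only [hf, hg]

-- ===== VERDICT (by name: the statement is the Claim_ definition above) =====
theorem interleave_decoders_zigzag_spec : Claim_equal_interleave_decoders_zigzag := by
  intro encoder dec_sorted₀ _ _
  unfold Spec_interleave_decoders_zigzag interleave_decoders_zigzag interleave_decoders_zigzag_alt
  dsimp only
  set d := PySem.Dict.ofList dec_sorted₀ with hdec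
  set tids := PySem.List.sorted (PySem.Dict.keys d) (fun x => x) false with htids
  cases hm : PySem.List.max? (tids.map (fun t => ((PySem.Dict.getD d t []).length : Int))) (fun x => x) with
  | none => rfl
  | some max_len =>
    dsimp only
    -- max_len is a length, hence a Nat
    obtain ⟨t0, _, hlen0⟩ := List.mem_map.1 (PySem.List.max?_mem hm)
    have h0 : 0 ≤ max_len := hlen0 ▸ Int.natCast_nonneg _
    have hM : max_len = ((max_len.toNat : Nat) : Int) := (Int.toNat_of_nonneg h0).symm
    set M := max_len.toNat with hMdef
    -- every task's layer count is at most M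
    have hbound : ∀ t ∈ tids, (PySem.Dict.getD d t []).length ≤ M := by
      intro t ht
      have := PySem.List.max?_isMax hm _ (List.mem_map_of_mem (f := fun t => ((PySem.Dict.getD d t []).length : Int)) ht)
      simp only at this
      omega
    -- A's side: nested loops → flattened level-major rows
    have hbody : ∀ (s : List Int) (i : Int),
        (if PySem.Int.mod i 2 == 0 then tids else tids.reverse).foldl (fun seq tid =>
            let layers := PySem.Dict.getD d tid []
            if i < (layers.length : Int) then seq ++ [PySem.List.pyGetD layers i 0] else seq) s
        = s ++ (if PySem.Int.mod i 2 == 0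
                then (tids.filter (fun t => i < ((PySem.Dict.getD d t []).length : Int))).map
                  (fun t => PySem.List.pyGetD (PySem.Dict.getD d t []) i 0)
                else ((tids.filter (fun t => i < ((PySem.Dict.getD d t []).length : Int))).map
                  (fun t => PySem.List.pyGetD (PySem.Dict.getD d t []) i 0)).reverse) := by
      intro s i
      by_cases h : (PySem.Int.mod i 2 == 0) = true
      · rw [if_pos h, if_pos h, inner_loop_eq]
      · rw [if_neg h, if_neg h, inner_loop_eq, List.filter_reverse, List.map_reverse]
    rw [funext (fun s => funext (hbody s))]
    rw [PySem.List.foldl_append_eq_flatMap, List.flatMap_def]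
    -- both sides over range M
    rw [hM, PySem.List.pyRange_zero_natCast, List.map_map, List.map_map]
    have hA : (List.range M).map ((fun i => if PySem.Int.mod i 2 == 0
                then (tids.filter (fun t => i < ((PySem.Dict.getD d t []).length : Int))).map
                  (fun t => PySem.List.pyGetD (PySem.Dict.getD d t []) i 0)
                else ((tids.filter (fun t => i < ((PySem.Dict.getD d t []).length : Int))).map
                  (fun t => PySem.List.pyGetD (PySem.Dict.getD d t []) i 0)).reverse) ∘ (fun k : Nat => (k : Int)))
        = (List.range M).map (fun j => zigRow d j tids) := by
      apply List.map_congr_left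
      intro j _
      exact row_bridge d tids j
    rw [hA]
    -- B's side: the bucket rows are exactly the forward level-major rows
    have hrows : tids.foldl (fun rows t =>
        (PySem.List.enumerate (PySem.Dict.getD d t []) 0).foldl (fun rows iv =>
          rows.modify iv.1.toNat (fun r => r ++ [iv.2])) rows)
        ((List.range M).map (fun _ => ([] : List Int)))
        = (List.range M).map (fun j => fwRow d j tids) := by
      apply List.ext_getElem?
      intro j
      rw [bucket_loop d M tids hbound j]
      simp only [List.getElem?_map]
      by_cases hj : j < M <;> simp [hj]
    rw [show (List.map ((fun _ => ([] : List Int)) ∘ (fun k : Nat => (k : Int))) (List.range M)) = (List.range M).map (fun _ => ([] : List Int)) from rfl]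
    rw [hrows]
    -- B's flatten loop reverses the odd rows while extending
    rw [PySem.List.foldl_append_eq_flatMap
      (g := fun ir : Int × List Int => if PySem.Int.mod ir.1 2 == 0 then ir.2 else ir.2.reverse),
      List.flatMap_def]
    have hzig : (PySem.List.enumerate ((List.range M).map (fun j => fwRow d j tids)) 0).map
        (fun ir : Int × List Int => if PySem.Int.mod ir.1 2 == 0 then ir.2 else ir.2.reverse)
        = (List.range M).map (fun j => zigRow d j tids) := by
      apply List.ext_getElem?
      intro j
      simp only [List.getElem?_map, PySem.List.getElem?_enumerate]
      by_cases hj : j < M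
      · have h2 : (2 ∣ (j : Int)) ↔ j % 2 = 0 := by omega
        simp [hj, zigRow, h2]
      · simp [hj]
    rw [hzig]
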